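-- pv_equiv track=rewrite | github.com/hoangnghia24/DoAnAI | arc_consistency_sokoban.py | is_deadlock
-- ===== SOURCE A (Python) =====
-- from typing import List, Tuple, Optional, Set, FrozenSet
--
-- def is_deadlock(boxes_pos: FrozenSet[Tuple[int, int]], walls: Set[Tuple[int, int]], goals: Set[Tuple[int, int]]) -> bool:
--
--     for box in boxes_pos:
--         if box in goals:
--             continue
--
--         x, y = box
--
--         # 1. Kiểm tra bế tắc ở góc (giống Forward Checking)
--         is_stuck_in_corner = (
--             ((x - 1, y) in walls and (x, y - 1) in walls) or
--             ((x + 1, y) in walls and (x, y - 1) in walls) or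
--             ((x - 1, y) in walls and (x, y + 1) in walls) or
--             ((x + 1, y) in walls and (x, y + 1) in walls)
--         )
--         if is_stuck_in_corner:
--             return True
--
--         # 2. Kiểm tra bế tắc "đóng băng" trên tường (tinh thần của Arc Consistency)
--         # Kiểm tra tường ngang
--         if (x, y - 1) in walls or (x, y + 1) in walls:
--             is_frozen = True
--             # Quét sang trái xem có đích không
--             for i in range(x, -1, -1):
--                 if (i, y) in walls: break
--                 if (i, y) in goals: is_frozen = False; break
--             if not is_frozen: continue
--
--             is_frozen = True
--              # Quét sang phải xem có đích không
--             for i in range(x, len(walls)):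
--                 if (i, y) in walls: break
--                 if (i, y) in goals: is_frozen = False; break
--             if is_frozen: return True
--
--         # Kiểm tra tường dọc
--         if (x - 1, y) in walls or (x + 1, y) in walls:
--             is_frozen = True
--             # Quét lên trên
--             for i in range(y, -1, -1):
--                 if (x, i) in walls: break
--                 if (x, i) in goals: is_frozen = False; break
--             if not is_frozen: continue
--
--             is_frozen = True
--             # Quét xuống dưới
--             for i in range(y, len(walls)):
--                 if (x, i) in walls: break
--                 if (x, i) in goals: is_frozen = False; break
--             if is_frozen: return True
--
--     return False
-- ===== SOURCE B (Python) =====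
-- def is_deadlock(boxes_pos, walls, goals):
--     n = len(walls)
--     # index walls/goals once by row and by column
--     wrow, wcol, grow, gcol = {}, {}, {}, {}
--     for (wx, wy) in walls:
--         wrow.setdefault(wy, []).append(wx)
--         wcol.setdefault(wx, []).append(wy)
--     for (gx, gy) in goals:
--         grow.setdefault(gy, []).append(gx)
--         gcol.setdefault(gx, []).append(gy)
--
--     def goal_before_wall_down(gs, ws, start):
--         # scanning start, start-1, ..., 0: is a goal reached before any wall?
--         gmax = max((g for g in gs if 0 <= g <= start), default=None)
--         wmax = max((w for w in ws if 0 <= w <= start), default=None)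
--         return gmax is not None and (wmax is None or wmax < gmax)
--
--     def goal_before_wall_up(gs, ws, start, stop):
--         # scanning start, start+1, ..., stop-1: is a goal reached before any wall?
--         gmin = min((g for g in gs if start <= g <= stop - 1), default=None)
--         wmin = min((w for w in ws if start <= w <= stop - 1), default=None)
--         return gmin is not None and (wmin is None or gmin < wmin)
--
--     for box in boxes_pos:
--         if box in goals:
--             continue
--         x, y = box
--         if (((x - 1, y) in walls and (x, y - 1) in walls) or
--             ((x + 1, y) in walls and (x, y - 1) in walls) or
--             ((x - 1, y) in walls and (x, y + 1) in walls) or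
--             ((x + 1, y) in walls and (x, y + 1) in walls)):
--             return True
--         if (x, y - 1) in walls or (x, y + 1) in walls:
--             if goal_before_wall_down(grow.get(y, []), wrow.get(y, []), x):
--                 continue
--             if not goal_before_wall_up(grow.get(y, []), wrow.get(y, []), x, n):
--                 return True
--         if (x - 1, y) in walls or (x + 1, y) in walls:
--             if goal_before_wall_down(gcol.get(x, []), wcol.get(x, []), y):
--                 continue
--             if not goal_before_wall_up(gcol.get(x, []), wcol.get(x, []), y, n):
--                 return True
--     return False
-- ===== Notes on version B (the rewrite author's own statement) =====
-- stated objective: alternative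
-- what changed: B replaces A's four per-box break-on-wall/goal coordinate scans by row/column index lists built once from walls and goals, deciding each scan outcome from the extremal goal/wall coordinate inside the scanned interval; the outer per-box control flow (corner test, continue-on-left-goal) is kept, as it determines the result.
import Mathlib
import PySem

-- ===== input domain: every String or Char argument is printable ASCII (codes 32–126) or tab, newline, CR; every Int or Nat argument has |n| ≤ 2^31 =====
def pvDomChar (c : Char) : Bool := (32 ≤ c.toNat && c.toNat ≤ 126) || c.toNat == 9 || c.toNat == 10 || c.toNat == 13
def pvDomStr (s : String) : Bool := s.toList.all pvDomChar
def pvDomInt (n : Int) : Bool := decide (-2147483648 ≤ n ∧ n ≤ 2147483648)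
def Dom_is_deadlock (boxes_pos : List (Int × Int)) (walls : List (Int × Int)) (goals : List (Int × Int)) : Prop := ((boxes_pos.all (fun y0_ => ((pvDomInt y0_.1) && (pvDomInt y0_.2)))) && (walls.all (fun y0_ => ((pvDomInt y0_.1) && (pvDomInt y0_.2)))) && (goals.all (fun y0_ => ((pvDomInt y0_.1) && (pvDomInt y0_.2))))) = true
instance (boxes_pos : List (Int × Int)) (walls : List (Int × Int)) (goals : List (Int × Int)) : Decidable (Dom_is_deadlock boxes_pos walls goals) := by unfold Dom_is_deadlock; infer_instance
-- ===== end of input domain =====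

-- B replaces A's four break-on-wall/goal coordinate scans by row/column index lists built once,
-- deciding each scan from the extremal goal/wall coordinate in the scanned interval (objective: alternative).

-- ===== PORT A =====
-- 'for i in range(x, -1, -1): if cell in walls: break; if cell in goals: is_frozen = False; break'
def pvScanDec (f : Int → Int × Int) (walls goals : List (Int × Int)) (i : Int) : Bool :=
  if i < 0 then true
  else if f i ∈ walls then true
  else if f i ∈ goals then false
  else pvScanDec f walls goals (i - 1)
termination_by (i + 1).toNat
decreasing_by omega

-- 'for i in range(i, n): …' with the same two breaks
def pvScanInc (f : Int → Int × Int) (walls goals : List (Int × Int)) (i n : Int) : Bool :=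
  if n ≤ i then true
  else if f i ∈ walls then true
  else if f i ∈ goals then false
  else pvScanInc f walls goals (i + 1) n
termination_by (n - i).toNat
decreasing_by omega

def pvLoopA (walls goals : List (Int × Int)) : List (Int × Int) → Bool
  | [] => false
  | b :: rest =>
    if b ∈ goals then pvLoopA walls goals rest
    else
      let x := b.1
      let y := b.2
      if ((decide ((x - 1, y) ∈ walls) && decide ((x, y - 1) ∈ walls)) ||
          (decide ((x + 1, y) ∈ walls) && decide ((x, y - 1) ∈ walls)) ||
          (decide ((x - 1, y) ∈ walls) && decide ((x, y + 1) ∈ walls)) ||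
          (decide ((x + 1, y) ∈ walls) && decide ((x, y + 1) ∈ walls))) then true
      else
        let vert : Bool :=
          if (x - 1, y) ∈ walls ∨ (x + 1, y) ∈ walls then
            if pvScanDec (fun i => (x, i)) walls goals y then
              if pvScanInc (fun i => (x, i)) walls goals y (walls.length : Int) then true
              else pvLoopA walls goals rest
            else pvLoopA walls goals rest
          else pvLoopA walls goals rest
        if (x, y - 1) ∈ walls ∨ (x, y + 1) ∈ walls then
          if pvScanDec (fun i => (i, y)) walls goals x then
            if pvScanInc (fun i => (i, y)) walls goals x (walls.length : Int) then true
            else vert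
          else pvLoopA walls goals rest
        else vert

def is_deadlock (boxes_pos : List (Int × Int)) (walls : List (Int × Int)) (goals : List (Int × Int)) : Bool :=
  pvLoopA walls goals boxes_pos

-- ===== PORT B =====
-- build {key p -> [val p, …]} by one pass (Python: d.setdefault(k, []).append(v))
def pvGroupBy (key val : Int × Int → Int) (l : List (Int × Int)) : PySem.Dict Int (List Int) :=
  l.foldl (fun d p => d.modify (key p) [] (· ++ [val p])) PySem.Dict.empty

-- scanning start, start-1, …, 0: is a goal reached before any wall?
def pvGoalDown (gs ws : List Int) (start : Int) : Bool :=
  match PySem.List.max? (gs.filter (fun g => decide (0 ≤ g) && decide (g ≤ start))) (fun g => g) with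
  | none => false
  | some g =>
    match PySem.List.max? (ws.filter (fun w => decide (0 ≤ w) && decide (w ≤ start))) (fun w => w) with
    | none => true
    | some w => decide (w < g)

-- scanning start, start+1, …, stop-1: is a goal reached before any wall?
def pvGoalUp (gs ws : List Int) (start stop : Int) : Bool :=
  match PySem.List.min? (gs.filter (fun g => decide (start ≤ g) && decide (g ≤ stop - 1))) (fun g => g) with
  | none => false
  | some g =>
    match PySem.List.min? (ws.filter (fun w => decide (start ≤ w) && decide (w ≤ stop - 1))) (fun w => w) with
    | none => true
    | some w => decide (g < w)

def pvLoopB (walls goals : List (Int × Int)) (n : Int)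
    (wrow wcol grow gcol : PySem.Dict Int (List Int)) : List (Int × Int) → Bool
  | [] => false
  | b :: rest =>
    if b ∈ goals then pvLoopB walls goals n wrow wcol grow gcol rest
    else
      let x := b.1
      let y := b.2
      if ((decide ((x - 1, y) ∈ walls) && decide ((x, y - 1) ∈ walls)) ||
          (decide ((x + 1, y) ∈ walls) && decide ((x, y - 1) ∈ walls)) ||
          (decide ((x - 1, y) ∈ walls) && decide ((x, y + 1) ∈ walls)) ||
          (decide ((x + 1, y) ∈ walls) && decide ((x, y + 1) ∈ walls))) then true
      else
        let vert : Bool :=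
          if (x - 1, y) ∈ walls ∨ (x + 1, y) ∈ walls then
            if pvGoalDown (gcol.getD x []) (wcol.getD x []) y then
              pvLoopB walls goals n wrow wcol grow gcol rest
            else if pvGoalUp (gcol.getD x []) (wcol.getD x []) y n then
              pvLoopB walls goals n wrow wcol grow gcol rest
            else true
          else pvLoopB walls goals n wrow wcol grow gcol rest
        if (x, y - 1) ∈ walls ∨ (x, y + 1) ∈ walls then
          if pvGoalDown (grow.getD y []) (wrow.getD y []) x then
            pvLoopB walls goals n wrow wcol grow gcol rest
          else if pvGoalUp (grow.getD y []) (wrow.getD y []) x n then vert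
          else true
        else vert

def is_deadlock_alt (boxes_pos : List (Int × Int)) (walls : List (Int × Int)) (goals : List (Int × Int)) : Bool :=
  pvLoopB walls goals (walls.length : Int)
    (pvGroupBy (·.2) (·.1) walls) (pvGroupBy (·.1) (·.2) walls)
    (pvGroupBy (·.2) (·.1) goals) (pvGroupBy (·.1) (·.2) goals)
    boxes_pos

-- ===== PRECONDITION & SPEC =====
def Spec_is_deadlock (boxes_pos : List (Int × Int)) (walls : List (Int × Int)) (goals : List (Int × Int)) (out : Bool) : Prop := out = is_deadlock_alt boxes_pos walls goals
instance (boxes_pos : List (Int × Int)) (walls : List (Int × Int)) (goals : List (Int × Int)) (out : Bool) : Decidable (Spec_is_deadlock boxes_pos walls goals out) := by unfold Spec_is_deadlock; infer_instance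

-- ===== CLAIM (what is proved, stated in full; the proofs are below) =====
def Claim_equal_is_deadlock : Prop := ∀ (boxes_pos : List (Int × Int)) (walls : List (Int × Int)) (goals : List (Int × Int)), Dom_is_deadlock boxes_pos walls goals → Spec_is_deadlock boxes_pos walls goals (is_deadlock boxes_pos walls goals)

-- ===== LEMMAS AND PROOFS =====

-- the proposition both scan encodings decide: a goal lies in the scanned interval above every wall of it
def GoalDownP (gs ws : List Int) (start : Int) : Prop :=
  ∃ g ∈ gs, 0 ≤ g ∧ g ≤ start ∧ ∀ w ∈ ws, 0 ≤ w → w ≤ start → w < g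
def GoalUpP (gs ws : List Int) (start stop : Int) : Prop :=
  ∃ g ∈ gs, start ≤ g ∧ g ≤ stop - 1 ∧ ∀ w ∈ ws, start ≤ w → w ≤ stop - 1 → g < w

lemma pvGroupBy_mem_aux (key val : Int × Int → Int) (l : List (Int × Int))
    (d : PySem.Dict Int (List Int)) (k a : Int) :
    a ∈ (l.foldl (fun d p => d.modify (key p) [] (· ++ [val p])) d).getD k [] ↔
      a ∈ d.getD k [] ∨ ∃ p ∈ l, key p = k ∧ val p = a := by
  induction l generalizing d with
  | nil => simp
  | cons p t ih =>
    simp only [List.foldl_cons, ih, List.mem_cons]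
    by_cases h : key p = k
    · subst h
      rw [PySem.Dict.getD_modify_self]
      simp only [List.mem_append, List.mem_singleton]
      aesop
    · rw [PySem.Dict.getD_modify_of_ne _ _ _ (fun he => h he.symm)]
      aesop

lemma pvGroupBy_mem (key val : Int × Int → Int) (l : List (Int × Int)) (k a : Int) :
    a ∈ (pvGroupBy key val l).getD k [] ↔ ∃ p ∈ l, key p = k ∧ val p = a := by
  unfold pvGroupBy
  rw [pvGroupBy_mem_aux]
  simp [PySem.Dict.getD, PySem.Dict.get?, PySem.Dict.empty]

lemma pvGoalDown_iff (gs ws : List Int) (start : Int) :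
    pvGoalDown gs ws start = true ↔ GoalDownP gs ws start := by
  unfold pvGoalDown GoalDownP
  cases hGm : PySem.List.max? (gs.filter (fun g => decide (0 ≤ g) && decide (g ≤ start))) (fun g => g) with
  | none =>
    rw [PySem.List.max?_eq_none_iff] at hGm
    simp only [Bool.false_eq_true, false_iff]
    rintro ⟨g, hgs, h0, hle, -⟩
    have : g ∈ gs.filter (fun g => decide (0 ≤ g) && decide (g ≤ start)) := by
      simp only [List.mem_filter, Bool.and_eq_true, decide_eq_true_eq]; exact ⟨hgs, h0, hle⟩
    rw [hGm] at this; exact absurd this (List.not_mem_nil)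
  | some g =>
    have hmem := PySem.List.max?_mem hGm
    have hmax := PySem.List.max?_isMax hGm
    rw [List.mem_filter] at hmem
    simp only [Bool.and_eq_true, decide_eq_true_eq] at hmem
    cases hWm : PySem.List.max? (ws.filter (fun w => decide (0 ≤ w) && decide (w ≤ start))) (fun w => w) with
    | none =>
      rw [PySem.List.max?_eq_none_iff] at hWm
      simp only [true_iff]
      refine ⟨g, hmem.1, hmem.2.1, hmem.2.2, fun w hws h0 hle => ?_⟩
      have : w ∈ ws.filter (fun w => decide (0 ≤ w) && decide (w ≤ start)) := by
        simp only [List.mem_filter, Bool.and_eq_true, decide_eq_true_eq]; exact ⟨hws, h0, hle⟩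
      rw [hWm] at this; exact absurd this (List.not_mem_nil)
    | some w =>
      have hwmem := PySem.List.max?_mem hWm
      have hwmax := PySem.List.max?_isMax hWm
      rw [List.mem_filter] at hwmem
      simp only [Bool.and_eq_true, decide_eq_true_eq] at hwmem
      simp only [decide_eq_true_eq]
      constructor
      · intro hlt
        refine ⟨g, hmem.1, hmem.2.1, hmem.2.2, fun w' hws h0 hle => ?_⟩
        have : w' ∈ ws.filter (fun w => decide (0 ≤ w) && decide (w ≤ start)) := by
          simp only [List.mem_filter, Bool.and_eq_true, decide_eq_true_eq]; exact ⟨hws, h0, hle⟩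
        exact lt_of_le_of_lt (hwmax _ this) hlt
      · rintro ⟨g', hgs, h0, hle, hall⟩
        have hg'g : g' ≤ g := hmax _ (by simp only [List.mem_filter, Bool.and_eq_true, decide_eq_true_eq]; exact ⟨hgs, h0, hle⟩)
        exact lt_of_lt_of_le (hall w hwmem.1 hwmem.2.1 hwmem.2.2) hg'g

lemma pvGoalUp_iff (gs ws : List Int) (start stop : Int) :
    pvGoalUp gs ws start stop = true ↔ GoalUpP gs ws start stop := by
  unfold pvGoalUp GoalUpP
  cases hGm : PySem.List.min? (gs.filter (fun g => decide (start ≤ g) && decide (g ≤ stop - 1))) (fun g => g) with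
  | none =>
    rw [PySem.List.min?_eq_none_iff] at hGm
    simp only [Bool.false_eq_true, false_iff]
    rintro ⟨g, hgs, h0, hle, -⟩
    have : g ∈ gs.filter (fun g => decide (start ≤ g) && decide (g ≤ stop - 1)) := by
      simp only [List.mem_filter, Bool.and_eq_true, decide_eq_true_eq]; exact ⟨hgs, h0, hle⟩
    rw [hGm] at this; exact absurd this (List.not_mem_nil)
  | some g =>
    have hmem := PySem.List.min?_mem hGm
    have hmin := PySem.List.min?_isMin hGm
    rw [List.mem_filter] at hmem
    simp only [Bool.and_eq_true, decide_eq_true_eq] at hmem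
    cases hWm : PySem.List.min? (ws.filter (fun w => decide (start ≤ w) && decide (w ≤ stop - 1))) (fun w => w) with
    | none =>
      rw [PySem.List.min?_eq_none_iff] at hWm
      simp only [true_iff]
      refine ⟨g, hmem.1, hmem.2.1, hmem.2.2, fun w hws h0 hle => ?_⟩
      have : w ∈ ws.filter (fun w => decide (start ≤ w) && decide (w ≤ stop - 1)) := by
        simp only [List.mem_filter, Bool.and_eq_true, decide_eq_true_eq]; exact ⟨hws, h0, hle⟩
      rw [hWm] at this; exact absurd this (List.not_mem_nil)
    | some w =>
      have hwmem := PySem.List.min?_mem hWm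
      have hwmin := PySem.List.min?_isMin hWm
      rw [List.mem_filter] at hwmem
      simp only [Bool.and_eq_true, decide_eq_true_eq] at hwmem
      simp only [decide_eq_true_eq]
      constructor
      · intro hlt
        refine ⟨g, hmem.1, hmem.2.1, hmem.2.2, fun w' hws h0 hle => ?_⟩
        have : w' ∈ ws.filter (fun w => decide (start ≤ w) && decide (w ≤ stop - 1)) := by
          simp only [List.mem_filter, Bool.and_eq_true, decide_eq_true_eq]; exact ⟨hws, h0, hle⟩
        exact lt_of_lt_of_le hlt (hwmin _ this)
      · rintro ⟨g', hgs, h0, hle, hall⟩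
        have hgg' : g ≤ g' := hmin _ (by simp only [List.mem_filter, Bool.and_eq_true, decide_eq_true_eq]; exact ⟨hgs, h0, hle⟩)
        exact lt_of_le_of_lt hgg' (hall w hwmem.1 hwmem.2.1 hwmem.2.2)

lemma pvScanDec_false_iff (f : Int → Int × Int) (walls goals : List (Int × Int)) (gs ws : List Int)
    (hg : ∀ i, f i ∈ goals ↔ i ∈ gs) (hw : ∀ i, f i ∈ walls ↔ i ∈ ws) (x : Int) :
    pvScanDec f walls goals x = false ↔ GoalDownP gs ws x := by
  have H : ∀ n : Nat, ∀ x : Int, (x + 1).toNat ≤ n →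
      (pvScanDec f walls goals x = false ↔ GoalDownP gs ws x) := by
    intro n
    induction n with
    | zero =>
      intro x hx
      rw [pvScanDec, if_pos (by omega : x < 0)]
      simp only [Bool.true_eq_false, false_iff]
      rintro ⟨g, -, h0, hle, -⟩; omega
    | succ n ih =>
      intro x hx
      rw [pvScanDec]
      by_cases h0 : x < 0
      · rw [if_pos h0]
        simp only [Bool.true_eq_false, false_iff]
        rintro ⟨g, -, hg0, hle, -⟩; omega
      · rw [if_neg h0]
        by_cases hwx : f x ∈ walls
        · rw [if_pos hwx]
          simp only [Bool.true_eq_false, false_iff]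
          rintro ⟨g, -, hg0, hle, hall⟩
          have := hall x ((hw x).mp hwx) (by omega) le_rfl
          omega
        · rw [if_neg hwx]
          by_cases hgx : f x ∈ goals
          · rw [if_pos hgx]
            simp only [true_iff]
            refine ⟨x, (hg x).mp hgx, by omega, le_rfl, fun w hws hw0 hwle => ?_⟩
            have hne : w ≠ x := fun he => hwx ((hw x).mpr (he ▸ hws))
            omega
          · rw [if_neg hgx, ih (x - 1) (by omega)]
            constructor
            · rintro ⟨g, hgs, hg0, hle, hall⟩
              refine ⟨g, hgs, hg0, by omega, fun w hws hw0 hwle => ?_⟩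
              have hne : w ≠ x := fun he => hwx ((hw x).mpr (he ▸ hws))
              exact hall w hws hw0 (by omega)
            · rintro ⟨g, hgs, hg0, hle, hall⟩
              have hne : g ≠ x := fun he => hgx ((hg x).mpr (he ▸ hgs))
              exact ⟨g, hgs, hg0, by omega, fun w hws hw0 hwle => hall w hws hw0 (by omega)⟩
  exact H (x + 1).toNat x le_rfl

lemma pvScanDec_eq (f : Int → Int × Int) (walls goals : List (Int × Int)) (gs ws : List Int)
    (hg : ∀ i, f i ∈ goals ↔ i ∈ gs) (hw : ∀ i, f i ∈ walls ↔ i ∈ ws) (x : Int) :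
    pvScanDec f walls goals x = !pvGoalDown gs ws x := by
  have h1 := pvScanDec_false_iff f walls goals gs ws hg hw x
  have h2 := pvGoalDown_iff gs ws x
  cases hG : pvGoalDown gs ws x with
  | true => simpa using h1.mpr (h2.mp hG)
  | false =>
    simp only [Bool.not_false]
    cases hS : pvScanDec f walls goals x with
    | true => rfl
    | false => exact absurd (h1.mp hS) (fun p => by simp [h2.mpr p] at hG)

lemma pvScanInc_false_iff (f : Int → Int × Int) (walls goals : List (Int × Int)) (gs ws : List Int)
    (hg : ∀ i, f i ∈ goals ↔ i ∈ gs) (hw : ∀ i, f i ∈ walls ↔ i ∈ ws) (x n : Int) :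
    pvScanInc f walls goals x n = false ↔ GoalUpP gs ws x n := by
  have H : ∀ m : Nat, ∀ x : Int, (n - x).toNat ≤ m →
      (pvScanInc f walls goals x n = false ↔ GoalUpP gs ws x n) := by
    intro m
    induction m with
    | zero =>
      intro x hx
      rw [pvScanInc, if_pos (by omega : n ≤ x)]
      simp only [Bool.true_eq_false, false_iff]
      rintro ⟨g, -, h0, hle, -⟩; omega
    | succ m ih =>
      intro x hx
      rw [pvScanInc]
      by_cases h0 : n ≤ x
      · rw [if_pos h0]
        simp only [Bool.true_eq_false, false_iff]
        rintro ⟨g, -, hg0, hle, -⟩; omega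
      · rw [if_neg h0]
        by_cases hwx : f x ∈ walls
        · rw [if_pos hwx]
          simp only [Bool.true_eq_false, false_iff]
          rintro ⟨g, -, hg0, hle, hall⟩
          have := hall x ((hw x).mp hwx) le_rfl (by omega)
          omega
        · rw [if_neg hwx]
          by_cases hgx : f x ∈ goals
          · rw [if_pos hgx]
            simp only [true_iff]
            refine ⟨x, (hg x).mp hgx, le_rfl, by omega, fun w hws hw0 hwle => ?_⟩
            have hne : w ≠ x := fun he => hwx ((hw x).mpr (he ▸ hws))
            omega
          · rw [if_neg hgx, ih (x + 1) (by omega)]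
            constructor
            · rintro ⟨g, hgs, hg0, hle, hall⟩
              refine ⟨g, hgs, by omega, hle, fun w hws hw0 hwle => ?_⟩
              have hne : w ≠ x := fun he => hwx ((hw x).mpr (he ▸ hws))
              exact hall w hws (by omega) hwle
            · rintro ⟨g, hgs, hg0, hle, hall⟩
              have hne : g ≠ x := fun he => hgx ((hg x).mpr (he ▸ hgs))
              exact ⟨g, hgs, by omega, hle, fun w hws hw0 hwle => hall w hws (by omega) hwle⟩
  exact H (n - x).toNat x le_rfl

lemma pvScanInc_eq (f : Int → Int × Int) (walls goals : List (Int × Int)) (gs ws : List Int)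
    (hg : ∀ i, f i ∈ goals ↔ i ∈ gs) (hw : ∀ i, f i ∈ walls ↔ i ∈ ws) (x n : Int) :
    pvScanInc f walls goals x n = !pvGoalUp gs ws x n := by
  have h1 := pvScanInc_false_iff f walls goals gs ws hg hw x n
  have h2 := pvGoalUp_iff gs ws x n
  cases hG : pvGoalUp gs ws x n with
  | true => simpa using h1.mpr (h2.mp hG)
  | false =>
    simp only [Bool.not_false]
    cases hS : pvScanInc f walls goals x n with
    | true => rfl
    | false => exact absurd (h1.mp hS) (fun p => by simp [h2.mpr p] at hG)

lemma pvLoop_eq (walls goals : List (Int × Int)) (boxes : List (Int × Int)) :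
    pvLoopA walls goals boxes =
      pvLoopB walls goals (walls.length : Int)
        (pvGroupBy (·.2) (·.1) walls) (pvGroupBy (·.1) (·.2) walls)
        (pvGroupBy (·.2) (·.1) goals) (pvGroupBy (·.1) (·.2) goals) boxes := by
  have hrow : ∀ (l : List (Int × Int)) (i y : Int),
      (i, y) ∈ l ↔ i ∈ (pvGroupBy (·.2) (·.1) l).getD y [] := by
    intro l i y
    rw [pvGroupBy_mem]
    constructor
    · intro h; exact ⟨(i, y), h, rfl, rfl⟩
    · rintro ⟨⟨px, py⟩, hp, hk, hv⟩
      simp only at hk hv; subst hk; subst hv; exact hp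
  have hcol : ∀ (l : List (Int × Int)) (i x : Int),
      (x, i) ∈ l ↔ i ∈ (pvGroupBy (·.1) (·.2) l).getD x [] := by
    intro l i x
    rw [pvGroupBy_mem]
    constructor
    · intro h; exact ⟨(x, i), h, rfl, rfl⟩
    · rintro ⟨⟨px, py⟩, hp, hk, hv⟩
      simp only at hk hv; subst hk; subst hv; exact hp
  induction boxes with
  | nil => rfl
  | cons b rest ih =>
    have e1 := pvScanDec_eq (fun i => (i, b.2)) walls goals
      ((pvGroupBy (·.2) (·.1) goals).getD b.2 []) ((pvGroupBy (·.2) (·.1) walls).getD b.2 [])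
      (fun i => hrow goals i b.2) (fun i => hrow walls i b.2) b.1
    have e2 := pvScanInc_eq (fun i => (i, b.2)) walls goals
      ((pvGroupBy (·.2) (·.1) goals).getD b.2 []) ((pvGroupBy (·.2) (·.1) walls).getD b.2 [])
      (fun i => hrow goals i b.2) (fun i => hrow walls i b.2) b.1 (walls.length : Int)
    have e3 := pvScanDec_eq (fun i => (b.1, i)) walls goals
      ((pvGroupBy (·.1) (·.2) goals).getD b.1 []) ((pvGroupBy (·.1) (·.2) walls).getD b.1 [])
      (fun i => hcol goals i b.1) (fun i => hcol walls i b.1) b.2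
    have e4 := pvScanInc_eq (fun i => (b.1, i)) walls goals
      ((pvGroupBy (·.1) (·.2) goals).getD b.1 []) ((pvGroupBy (·.1) (·.2) walls).getD b.1 [])
      (fun i => hcol goals i b.1) (fun i => hcol walls i b.1) b.2 (walls.length : Int)
    simp only [pvLoopA, pvLoopB, e1, e2, e3, e4, ih]
    cases pvGoalDown ((pvGroupBy (·.2) (·.1) goals).getD b.2 []) ((pvGroupBy (·.2) (·.1) walls).getD b.2 []) b.1 <;>
      cases pvGoalUp ((pvGroupBy (·.2) (·.1) goals).getD b.2 []) ((pvGroupBy (·.2) (·.1) walls).getD b.2 []) b.1 (walls.length : Int) <;>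
      cases pvGoalDown ((pvGroupBy (·.1) (·.2) goals).getD b.1 []) ((pvGroupBy (·.1) (·.2) walls).getD b.1 []) b.2 <;>
      cases pvGoalUp ((pvGroupBy (·.1) (·.2) goals).getD b.1 []) ((pvGroupBy (·.1) (·.2) walls).getD b.1 []) b.2 (walls.length : Int) <;>
      simp

-- ===== VERDICT (by name: the statement is the Claim_ definition above) =====
theorem is_deadlock_spec : Claim_equal_is_deadlock := by
  intro boxes walls goals _
  unfold Spec_is_deadlock is_deadlock is_deadlock_alt
  exact pvLoop_eq walls goals boxes
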